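-- pv_equiv track=rewrite | github.com/Stevensbe/system_procon | procon_system/auditoria/middleware.py | determinar_recurso
-- ===== SOURCE A (Python) =====
-- def determinar_recurso(path):
--     """Determina recurso baseado no path"""
--     # Remover parâmetros de query
--     path = path.split('?')[0]
--
--     # Mapear paths para recursos
--     mapeamento = {
--         '/admin/': 'admin',
--         '/api/': 'api',
--         '/notificacoes/': 'notificacoes',
--         '/auditoria/': 'auditoria',
--         '/recursos/': 'recursos',
--         '/fiscalizacao/': 'fiscalizacao',
--         '/protocolo/': 'protocolo',
--         '/peticionamento/': 'peticionamento',
--     }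
--
--     for prefixo, recurso in mapeamento.items():
--         if path.startswith(prefixo):
--             return recurso
--
--     return 'outro'
-- ===== SOURCE B (Python) =====
-- RECURSOS = {
--     'admin', 'api', 'notificacoes', 'auditoria',
--     'recursos', 'fiscalizacao', 'protocolo', 'peticionamento',
-- }
--
--
-- def determinar_recurso(path):
--     """Determina recurso baseado no path"""
--     path = path.split('?')[0]
--     parts = path.split('/')
--     if len(parts) >= 3 and parts[0] == '' and parts[1] in RECURSOS:
--         return parts[1]
--     return 'outro'
-- ===== Notes on version B (the rewrite author's own statement) =====
-- stated objective: idiomatic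
-- what changed: Replaces the ordered prefix-scan loop over a dict of slash-delimited prefixes with parse-then-lookup: split the path on the slash separator and return the second segment iff it is one of the known resource names and a further slash follows it.
import Mathlib
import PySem

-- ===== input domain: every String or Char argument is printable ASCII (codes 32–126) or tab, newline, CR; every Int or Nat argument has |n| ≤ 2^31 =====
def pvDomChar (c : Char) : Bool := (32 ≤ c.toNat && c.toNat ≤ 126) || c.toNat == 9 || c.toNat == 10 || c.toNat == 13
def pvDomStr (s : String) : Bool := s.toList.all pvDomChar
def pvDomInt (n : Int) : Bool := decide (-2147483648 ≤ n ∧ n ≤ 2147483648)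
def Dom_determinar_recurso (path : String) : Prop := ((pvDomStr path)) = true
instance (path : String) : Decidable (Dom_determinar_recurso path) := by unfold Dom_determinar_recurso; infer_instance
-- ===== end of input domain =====

-- B replaces A's ordered prefix-scan over a dict of slash-delimited prefixes by parsing the
-- path (splitting on the slash separator) and looking the second segment up in a set of
-- resource names (idiomatic).

-- ===== PORT A =====
-- the 'for prefixo, recurso in mapeamento.items(): if path.startswith(prefixo): return recurso' loop
def determinar_recurso_loop (path : String) : List (String × String) → String
  | [] => "outro"
  | (prefixo, recurso) :: rest =>
    if PySem.Str.startswith path prefixo then recurso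
    else determinar_recurso_loop path rest

def determinar_recurso (path : String) : String :=
  -- path.split('?')[0]: the separator is non-empty and split always yields a non-empty list,
  -- so the getD/headD defaults never fire
  let path := ((PySem.Str.split? path "?").getD []).headD ""
  let mapeamento : PySem.Dict String String :=
    ((((((((PySem.Dict.empty.insert "/admin/" "admin").insert "/api/" "api").insert
      "/notificacoes/" "notificacoes").insert "/auditoria/" "auditoria").insert
      "/recursos/" "recursos").insert "/fiscalizacao/" "fiscalizacao").insert
      "/protocolo/" "protocolo").insert "/peticionamento/" "peticionamento")
  determinar_recurso_loop path mapeamento.items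

-- ===== PORT B =====
def pvRecursos : PySem.Set String :=
  PySem.Set.ofList ["admin", "api", "notificacoes", "auditoria", "recursos",
    "fiscalizacao", "protocolo", "peticionamento"]

def determinar_recurso_alt (path : String) : String :=
  -- path.split('?')[0] as in A; parts[0]/parts[1] are guarded by len(parts) >= 3,
  -- so the getD defaults never fire
  let path := ((PySem.Str.split? path "?").getD []).headD ""
  let parts := (PySem.Str.split? path "/").getD []
  if 3 ≤ parts.length ∧ parts.headD "" = "" ∧ parts.getD 1 "" ∈ pvRecursos then
    parts.getD 1 ""
  else "outro"

-- ===== PRECONDITION & SPEC =====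
def Spec_determinar_recurso (path : String) (out : String) : Prop := out = determinar_recurso_alt path
instance (path : String) (out : String) : Decidable (Spec_determinar_recurso path out) := by unfold Spec_determinar_recurso; infer_instance

-- ===== CLAIM (what is proved, stated in full; the proofs are below) =====
def Claim_equal_determinar_recurso : Prop := ∀ (path : String), Dom_determinar_recurso path → Spec_determinar_recurso path (determinar_recurso path)

-- ===== LEMMAS AND PROOFS =====

/-- Structural recursion computing `PySem.Chars.splitOn cs ['/']` (proof helper). -/
def splitSlash : List Char → List (List Char)
  | [] => [[]]
  | c :: t => if c = '/' then [] :: splitSlash t else (splitSlash t).modifyHead (c :: ·)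

theorem splitSlash_cons_slash (t : List Char) : splitSlash ('/' :: t) = [] :: splitSlash t := by
  simp [splitSlash]

theorem splitSlash_ne_nil (cs : List Char) : splitSlash cs ≠ [] := by
  cases cs with
  | nil => simp [splitSlash]
  | cons c t =>
    simp only [splitSlash]
    split_ifs
    · simp
    · cases h : splitSlash t with
      | nil => exact absurd h (splitSlash_ne_nil t)
      | cons a b => simp

theorem splitOn_go_eq (cs : List Char) : ∀ (fuel : Nat) (cur : List Char) (acc : List (List Char)),
    cs.length ≤ fuel →
    PySem.Chars.splitOn.go ['/'] fuel cs cur acc =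
      acc.reverse ++ (splitSlash cs).modifyHead (cur.reverse ++ ·) := by
  induction cs with
  | nil =>
    intro fuel cur acc _
    cases fuel <;> simp [PySem.Chars.splitOn.go, splitSlash]
  | cons c t ih =>
    intro fuel cur acc hle
    cases fuel with
    | zero => simp at hle
    | succ f =>
      by_cases hc : c = '/'
      · subst hc
        rw [PySem.Chars.splitOn.go]
        simp only [List.isPrefixOf, beq_self_eq_true, Bool.true_and, if_pos]
        have hdrop : List.drop ['/'].length ('/' :: t) = t := rfl
        rw [hdrop, ih f [] (cur.reverse :: acc) (by simpa using Nat.lt_succ_iff.mp (by simpa using hle))]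
        rw [splitSlash_cons_slash]
        rcases hS : splitSlash t with _ | ⟨m, rest⟩
        · exact absurd hS (splitSlash_ne_nil t)
        · simp
      · rw [PySem.Chars.splitOn.go]
        have hpre : List.isPrefixOf ['/'] (c :: t) = false := by
          simp [List.isPrefixOf, hc]
          intro h; exact absurd h.symm hc
        rw [hpre]
        simp only [Bool.false_eq_true, if_false]
        rw [ih f (c :: cur) acc (by simpa using Nat.lt_succ_iff.mp (by simpa using hle))]
        rcases hS : splitSlash t with _ | ⟨m, rest⟩
        · exact absurd hS (splitSlash_ne_nil t)
        · simp [splitSlash, hc, hS]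

theorem splitOn_slash (cs : List Char) : PySem.Chars.splitOn cs ['/'] = splitSlash cs := by
  rw [PySem.Chars.splitOn, splitOn_go_eq cs (cs.length + 1) [] [] (by omega)]
  rcases hS : splitSlash cs with _ | ⟨m, rest⟩
  · exact absurd hS (splitSlash_ne_nil cs)
  · simp

/-- `t` starts with `name ++ "/"` iff `name` is the complete first '/'-segment of `t`
    and a '/' follows it. -/
theorem prefix_iff_segment (name : List Char) : ∀ (t : List Char), '/' ∉ name →
    (List.isPrefixOf (name ++ ['/']) t = true ↔
      2 ≤ (splitSlash t).length ∧ (splitSlash t).headD [] = name) := by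
  induction name with
  | nil =>
    intro t _
    cases t with
    | nil => simp [List.isPrefixOf, splitSlash]
    | cons c t' =>
      by_cases hc : c = '/'
      · subst hc
        have := splitSlash_ne_nil t'
        simp [List.isPrefixOf, splitSlash]
        rcases hS : splitSlash t' with _ | ⟨m, rest⟩
        · exact absurd hS this
        · simp
      · simp only [splitSlash, if_neg hc]
        rcases hS : splitSlash t' with _ | ⟨m, rest⟩
        · exact absurd hS (splitSlash_ne_nil t')
        · simp [List.isPrefixOf, hc]
          intro h; exact absurd h.symm hc
  | cons a name' ih =>
    intro t hmem
    have ha : a ≠ '/' := by intro h; exact hmem (by simp [h])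
    cases t with
    | nil => simp [List.isPrefixOf, splitSlash]
    | cons c t' =>
      by_cases hc : c = '/'
      · subst hc
        simp [List.isPrefixOf, splitSlash, Ne.symm ha]
        exact fun h => absurd h ha
      · simp only [splitSlash, if_neg hc]
        rcases hS : splitSlash t' with _ | ⟨m, rest⟩
        · exact absurd hS (splitSlash_ne_nil t')
        · have ih' := ih t' (fun h => hmem (by simp [h]))
          rw [hS] at ih'
          simp only [List.isPrefixOf, List.cons_append, List.modifyHead_cons,
            List.length_cons, List.headD_cons] at *
          constructor
          · rintro h
            rw [Bool.and_eq_true, beq_iff_eq] at h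
            obtain ⟨rfl, h2⟩ := h
            obtain ⟨hl, rfl⟩ := ih'.mp h2
            exact ⟨by omega, rfl⟩
          · rintro ⟨hl, he⟩
            injection he with h1 h2
            subst h1; subst h2
            rw [Bool.and_eq_true, beq_iff_eq]
            exact ⟨rfl, ih'.mpr ⟨by omega, rfl⟩⟩

/-- A's `path.startswith('/name/')` test, restated on the split segments. -/
theorem startswith_iff_parts (name : List Char) (cs : List Char) (hmem : '/' ∉ name) :
    (List.isPrefixOf ('/' :: (name ++ ['/'])) cs = true ↔
      3 ≤ (splitSlash cs).length ∧ (splitSlash cs).headD ['x'] = [] ∧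
        (splitSlash cs).tail.headD [] = name) := by
  cases cs with
  | nil => simp [List.isPrefixOf, splitSlash]
  | cons c t =>
    by_cases hc : c = '/'
    · subst hc
      have h := prefix_iff_segment name t hmem
      rw [splitSlash_cons_slash]
      simp only [List.isPrefixOf, beq_self_eq_true, Bool.true_and, List.length_cons,
        List.headD_cons, List.tail_cons, h]
      constructor
      · rintro ⟨hl, he⟩; exact ⟨by omega, trivial, he⟩
      · rintro ⟨hl, -, he⟩; exact ⟨by omega, he⟩
    · simp only [splitSlash, if_neg hc]
      rcases hS : splitSlash t with _ | ⟨m, rest⟩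
      · exact absurd hS (splitSlash_ne_nil t)
      · simp [List.isPrefixOf, hc]
        intro h; exact absurd h.symm hc

-- ===== VERDICT (by name: the statement is the Claim_ definition above) =====
theorem determinar_recurso_spec : Claim_equal_determinar_recurso := by
  intro path _
  unfold Spec_determinar_recurso determinar_recurso determinar_recurso_alt
  -- both ports strip the query string identically; generalize that value
  generalize ((PySem.Str.split? path "?").getD []).headD "" = q
  have hitems : (PySem.Dict.empty (κ := String) (ν := String)
      |>.insert "/admin/" "admin" |>.insert "/api/" "api"
      |>.insert "/notificacoes/" "notificacoes" |>.insert "/auditoria/" "auditoria"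
      |>.insert "/recursos/" "recursos" |>.insert "/fiscalizacao/" "fiscalizacao"
      |>.insert "/protocolo/" "protocolo" |>.insert "/peticionamento/" "peticionamento").items =
      [("/admin/", "admin"), ("/api/", "api"), ("/notificacoes/", "notificacoes"),
       ("/auditoria/", "auditoria"), ("/recursos/", "recursos"),
       ("/fiscalizacao/", "fiscalizacao"), ("/protocolo/", "protocolo"),
       ("/peticionamento/", "peticionamento")] := by rfl
  simp only [hitems, determinar_recurso_loop, PySem.Str.startswith_eq, PySem.Chars.startswith]
  have t1 : "/admin/".toList = '/' :: ("admin".toList ++ ['/']) := by decide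
  have t2 : "/api/".toList = '/' :: ("api".toList ++ ['/']) := by decide
  have t3 : "/notificacoes/".toList = '/' :: ("notificacoes".toList ++ ['/']) := by decide
  have t4 : "/auditoria/".toList = '/' :: ("auditoria".toList ++ ['/']) := by decide
  have t5 : "/recursos/".toList = '/' :: ("recursos".toList ++ ['/']) := by decide
  have t6 : "/fiscalizacao/".toList = '/' :: ("fiscalizacao".toList ++ ['/']) := by decide
  have t7 : "/protocolo/".toList = '/' :: ("protocolo".toList ++ ['/']) := by decide
  have t8 : "/peticionamento/".toList = '/' :: ("peticionamento".toList ++ ['/']) := by decide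
  rw [t1, t2, t3, t4, t5, t6, t7, t8]
  simp only [startswith_iff_parts "admin".toList q.toList (by decide),
    startswith_iff_parts "api".toList q.toList (by decide),
    startswith_iff_parts "notificacoes".toList q.toList (by decide),
    startswith_iff_parts "auditoria".toList q.toList (by decide),
    startswith_iff_parts "recursos".toList q.toList (by decide),
    startswith_iff_parts "fiscalizacao".toList q.toList (by decide),
    startswith_iff_parts "protocolo".toList q.toList (by decide),
    startswith_iff_parts "peticionamento".toList q.toList (by decide)]
  have hsplit : (PySem.Str.split? q "/").getD [] = (splitSlash q.toList).map String.ofList := by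
    rw [PySem.Str.split?, PySem.Chars.split?, show "/".toList = ['/'] from rfl, splitOn_slash]
    simp
  rw [hsplit]
  have hmemset : ∀ x : String, (x ∈ pvRecursos) ↔
      (x = "admin" ∨ x = "api" ∨ x = "notificacoes" ∨ x = "auditoria" ∨ x = "recursos" ∨
       x = "fiscalizacao" ∨ x = "protocolo" ∨ x = "peticionamento") := by
    intro x
    rw [pvRecursos, PySem.Set.mem_ofList]
    simp
  rcases hS : splitSlash q.toList with _ | ⟨s0, srest⟩
  · exact absurd hS (splitSlash_ne_nil q.toList)
  rcases srest with _ | ⟨s1, srest2⟩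
  · simp
  simp only [hmemset, List.map_cons, List.length_cons, List.headD_cons, List.getD_cons_succ,
    List.getD_cons_zero, List.length_map, List.tail_cons, String.ofList_eq]
  simp only [show "".toList = ([] : List Char) from rfl]
  by_cases hl : 3 ≤ srest2.length + 1 + 1
  · by_cases h0 : s0 = []
    · by_cases e1 : s1 = "admin".toList
      · simp [hl, h0, e1, String.ofList_toList]
      by_cases e2 : s1 = "api".toList
      · simp [hl, h0, e1, e2, String.ofList_toList]
      by_cases e3 : s1 = "notificacoes".toList
      · simp [hl, h0, e1, e2, e3, String.ofList_toList]
      by_cases e4 : s1 = "auditoria".toList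
      · simp [hl, h0, e1, e2, e3, e4, String.ofList_toList]
      by_cases e5 : s1 = "recursos".toList
      · simp [hl, h0, e1, e2, e3, e4, e5, String.ofList_toList]
      by_cases e6 : s1 = "fiscalizacao".toList
      · simp [hl, h0, e1, e2, e3, e4, e5, e6, String.ofList_toList]
      by_cases e7 : s1 = "protocolo".toList
      · simp [hl, h0, e1, e2, e3, e4, e5, e6, e7, String.ofList_toList]
      by_cases e8 : s1 = "peticionamento".toList
      · simp [hl, h0, e1, e2, e3, e4, e5, e6, e7, e8, String.ofList_toList]
      · simp only [String.toList] at e1 e2 e3 e4 e5 e6 e7 e8 ⊢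
        simp [hl, h0, e1, e2, e3, e4, e5, e6, e7, e8]
    · simp [h0]
  · simp [hl]
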